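-- pv_equiv track=rewrite | github.com/ziggyuwu/agris-bot-pujb | import-discord.py | compute_crossed_streak_by_appearances
-- ===== SOURCE A (Python) =====
-- def compute_crossed_streak_by_appearances(active_dates, crossed_dates):
--     """Compute crossed streaks by consecutive queued appearances.
--
--     Missing calendar dates do not break the streak. The streak resets only when
--     the member appears as active on a recorded date.
--     """
--     if not crossed_dates:
--         return 0, 0
--
--     all_dates = sorted(active_dates | crossed_dates)
--     current = 0
--     longest = 0
--
--     for day in all_dates:
--         if day in crossed_dates:
--             current += 1
--             if current > longest:
--                 longest = current
--         elif day in active_dates: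
--             current = 0
--
--     current_final = 0
--     for day in reversed(all_dates):
--         if day in crossed_dates:
--             current_final += 1
--         elif day in active_dates:
--             break
--
--     return current_final, longest
-- ===== SOURCE B (Python) =====
-- def compute_crossed_streak_by_appearances(active_dates, crossed_dates):
--     """Single forward pass: collect crossed-run lengths split at active-only
--     days; the current streak is the last run and the longest is the max."""
--     if not crossed_dates:
--         return 0, 0
--     runs = [0]
--     for day in sorted(active_dates | crossed_dates):
--         if day in crossed_dates:
--             runs[-1] += 1
--         else:
--             runs.append(0)
--     return runs[-1], max(runs)
-- ===== Notes on version B (the rewrite author's own statement) =====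
-- stated objective: simpler
-- what changed: A's separate backward scan over reversed(all_dates) is eliminated: B does one forward pass collecting crossed-run lengths split at active-only days and returns (last run, max run).
import Mathlib
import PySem

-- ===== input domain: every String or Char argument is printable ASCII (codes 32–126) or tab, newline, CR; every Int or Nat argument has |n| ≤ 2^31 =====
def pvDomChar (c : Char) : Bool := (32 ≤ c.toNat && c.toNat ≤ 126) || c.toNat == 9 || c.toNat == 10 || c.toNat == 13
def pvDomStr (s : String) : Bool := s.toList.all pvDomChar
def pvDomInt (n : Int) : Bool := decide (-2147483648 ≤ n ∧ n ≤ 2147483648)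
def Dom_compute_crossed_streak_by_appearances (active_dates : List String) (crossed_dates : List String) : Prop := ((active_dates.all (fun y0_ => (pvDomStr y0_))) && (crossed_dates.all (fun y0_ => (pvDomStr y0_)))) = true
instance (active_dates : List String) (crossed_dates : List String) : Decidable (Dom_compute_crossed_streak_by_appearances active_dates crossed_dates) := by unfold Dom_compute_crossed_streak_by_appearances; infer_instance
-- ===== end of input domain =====

-- B replaces A's separate backward scan with a single forward pass collecting run lengths
-- (current = last run, longest = max run): simpler, one scan instead of two.


-- ===== PORT A =====
-- the backward 'for day in reversed(all_dates)' loop with its break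
def pvBwdA (active_dates crossed_dates : List String) : List String → Int → Int
  | [], acc => acc
  | d :: t, acc =>
    if crossed_dates.contains d then pvBwdA active_dates crossed_dates t (acc + 1)
    else if active_dates.contains d then acc
    else pvBwdA active_dates crossed_dates t acc

def compute_crossed_streak_by_appearances (active_dates : List String) (crossed_dates : List String) : Int × Int :=
  if crossed_dates = [] then (0, 0)
  else
    let all_dates := PySem.List.sorted (PySem.Set.union active_dates crossed_dates) (fun x => x) false
    let s := all_dates.foldl (fun (s : Int × Int) day =>
      if crossed_dates.contains day then
        let c := s.1 + 1
        (c, if c > s.2 then c else s.2)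
      else if active_dates.contains day then (0, s.2)
      else s) (0, 0)
    let current_final := pvBwdA active_dates crossed_dates all_dates.reverse 0
    (current_final, s.2)

-- ===== PORT B =====
-- runs is kept in REVERSED order (runs[-1] = head), so 'runs[-1] += 1' is a head update
-- and 'runs.append(0)' is a cons; max(runs) ignores order.
def compute_crossed_streak_by_appearances_alt (active_dates : List String) (crossed_dates : List String) : Int × Int :=
  if crossed_dates = [] then (0, 0)
  else
    let runs := (PySem.List.sorted (PySem.Set.union active_dates crossed_dates) (fun x => x) false).foldl
      (fun (rs : List Int) day =>
        if crossed_dates.contains day then (rs.headD 0 + 1) :: rs.tail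
        else 0 :: rs) [0]
    -- runs is never empty, so max? is some; getD 0 only totalises it
    (runs.headD 0, (PySem.List.max? runs (fun x => x)).getD 0)

-- ===== PRECONDITION & SPEC =====
def Spec_compute_crossed_streak_by_appearances (active_dates : List String) (crossed_dates : List String) (out : Int × Int) : Prop := out = compute_crossed_streak_by_appearances_alt active_dates crossed_dates
instance (active_dates : List String) (crossed_dates : List String) (out : Int × Int) : Decidable (Spec_compute_crossed_streak_by_appearances active_dates crossed_dates out) := by unfold Spec_compute_crossed_streak_by_appearances; infer_instance

-- ===== CLAIM (what is proved, stated in full; the proofs are below) =====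
def Claim_equal_compute_crossed_streak_by_appearances : Prop := ∀ (active_dates : List String) (crossed_dates : List String), Dom_compute_crossed_streak_by_appearances active_dates crossed_dates → Spec_compute_crossed_streak_by_appearances active_dates crossed_dates (compute_crossed_streak_by_appearances active_dates crossed_dates)

-- ===== LEMMAS AND PROOFS =====

theorem pv_foldl_max_max (t : List Int) : ∀ a b : Int, t.foldl max (max a b) = max (t.foldl max a) b := by
  induction t with
  | nil => intro a b; rfl
  | cons x t ih =>
    intro a b
    simp only [List.foldl_cons]
    rw [show max (max a b) x = max (max a x) b by omega, ih]

theorem pv_bwdA_acc (ac cr : List String) (xs : List String) : ∀ acc : Int,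
    pvBwdA ac cr xs acc = acc + pvBwdA ac cr xs 0 := by
  induction xs with
  | nil => intro acc; simp [pvBwdA]
  | cons d t ih =>
    intro acc
    simp only [pvBwdA]
    split
    · rw [ih (acc + 1), ih (0 + 1)]; omega
    · split
      · omega
      · exact ih acc

-- forward pass: A's (current, longest) state matches B's run list (head, running max)
theorem pv_fwd_rel (ac cr : List String) (xs : List String)
    (hok : ∀ d ∈ xs, ac.contains d ∨ cr.contains d) : ∀ (h : Int) (t : List Int),
    xs.foldl (fun (s : Int × Int) day =>
      if cr.contains day then
        let c := s.1 + 1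
        (c, if c > s.2 then c else s.2)
      else if ac.contains day then (0, s.2)
      else s) (h, (h :: t).foldl max 0)
    = (((xs.foldl (fun (rs : List Int) day =>
        if cr.contains day then (rs.headD 0 + 1) :: rs.tail else 0 :: rs) (h :: t)).headD 0),
       ((xs.foldl (fun (rs : List Int) day =>
        if cr.contains day then (rs.headD 0 + 1) :: rs.tail else 0 :: rs) (h :: t)).foldl max 0)) := by
  induction xs with
  | nil => intro h t; rfl
  | cons x xs ih =>
    intro h t
    have hx := hok x (by simp)
    have hok' : ∀ d ∈ xs, ac.contains d ∨ cr.contains d := fun d hd => hok d (List.mem_cons_of_mem _ hd)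
    simp only [List.foldl_cons]
    by_cases hc : cr.contains x
    · simp only [hc, if_true, List.headD_cons, List.tail_cons]
      have e : (if h + 1 > List.foldl max (max 0 h) t then h + 1 else List.foldl max (max 0 h) t)
          = List.foldl max (max 0 (h + 1)) t := by
        rw [pv_foldl_max_max t 0 h, pv_foldl_max_max t 0 (h + 1)]
        omega
      rw [e]
      have hih := ih hok' (h + 1) t
      simp only [List.foldl_cons] at hih
      exact hih
    · have ha : ac.contains x := by tauto
      simp only [hc, Bool.false_eq_true, if_false, ha, if_true]
      have hih := ih hok' 0 (h :: t)
      simp only [List.foldl_cons, max_self] at hih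
      exact hih

-- backward pass: A's reversed scan-with-break equals the head of B's run list
theorem pv_bwd_rel (ac cr : List String) (xs : List String)
    (hok : ∀ d ∈ xs, ac.contains d ∨ cr.contains d) :
    pvBwdA ac cr xs.reverse 0
    = (xs.foldl (fun (rs : List Int) day =>
        if cr.contains day then (rs.headD 0 + 1) :: rs.tail else 0 :: rs) [0]).headD 0 := by
  induction xs using List.reverseRecOn with
  | nil => rfl
  | append_singleton xs x ih =>
    have hx := hok x (by simp)
    have hok' : ∀ d ∈ xs, ac.contains d ∨ cr.contains d := fun d hd => hok d (by rw [List.mem_append]; exact Or.inl hd)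
    rw [List.reverse_append, List.foldl_append]
    simp only [List.reverse_cons, List.reverse_nil, List.nil_append, List.foldl_cons,
      List.foldl_nil, List.singleton_append, pvBwdA]
    by_cases hc : cr.contains x
    · simp only [hc, if_true, List.headD_cons]
      rw [pv_bwdA_acc ac cr xs.reverse (0 + 1), ih hok']
      omega
    · have ha : ac.contains x := by tauto
      rw [if_neg hc, if_neg hc, if_pos ha, List.headD_cons]

-- every entry of B's run list is nonnegative
theorem pv_runs_nonneg (cr : List String) (xs : List String) : ∀ (rs : List Int),
    (∀ r ∈ rs, 0 ≤ r) → ∀ r ∈ (xs.foldl (fun (rs : List Int) day =>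
        if cr.contains day then (rs.headD 0 + 1) :: rs.tail else 0 :: rs) rs), 0 ≤ r := by
  induction xs with
  | nil => exact fun rs h => h
  | cons x xs ih =>
    intro rs hrs
    simp only [List.foldl_cons]
    apply ih
    split
    · intro r hr
      rcases List.mem_cons.mp hr with h | h
      · have : 0 ≤ rs.headD 0 := by
          cases rs with
          | nil => simp
          | cons a l => exact hrs a (by simp)
        omega
      · exact hrs r (List.mem_of_mem_tail h)
    · intro r hr
      rcases List.mem_cons.mp hr with h | h
      · omega
      · exact hrs r h

-- max(runs) (Python max) equals the forward pass's running max seeded with 0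
theorem pv_max_runs (rs : List Int) (hne : rs ≠ []) (hnn : ∀ r ∈ rs, 0 ≤ r) :
    (PySem.List.max? rs (fun x => x)).getD 0 = rs.foldl max 0 := by
  cases rs with
  | nil => exact absurd rfl hne
  | cons x t =>
    rw [PySem.List.max?_id_cons]
    simp only [Option.getD_some, List.foldl_cons]
    have hx : 0 ≤ x := hnn x (by simp)
    rw [show max 0 x = x by omega]

-- ===== VERDICT (by name: the statement is the Claim_ definition above) =====
theorem compute_crossed_streak_by_appearances_spec : Claim_equal_compute_crossed_streak_by_appearances := by
  intro ac cr _
  unfold Spec_compute_crossed_streak_by_appearances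
  unfold compute_crossed_streak_by_appearances compute_crossed_streak_by_appearances_alt
  by_cases hcr : cr = []
  · simp [hcr]
  · simp only [hcr, if_false]
    set xs := PySem.List.sorted (PySem.Set.union ac cr) (fun x => x) false with hxs
    have hok : ∀ d ∈ xs, ac.contains d ∨ cr.contains d := by
      intro d hd
      rw [hxs, PySem.List.mem_sorted] at hd
      rcases (PySem.Set.mem_union _ _ d).mp hd with h | h
      · exact Or.inl (List.elem_eq_true_of_mem h)
      · exact Or.inr (List.elem_eq_true_of_mem h)
    have hfwd := pv_fwd_rel ac cr xs hok 0 []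
    have hbwd := pv_bwd_rel ac cr xs hok
    have hnn := pv_runs_nonneg cr xs [0] (by simp)
    have hne : (xs.foldl (fun (rs : List Int) day =>
        if cr.contains day then (rs.headD 0 + 1) :: rs.tail else 0 :: rs) [0]) ≠ [] := by
      clear hfwd hbwd hnn
      induction xs using List.reverseRecOn with
      | nil => simp
      | append_singleton ys y _ =>
        rw [List.foldl_append]
        simp only [List.foldl_cons, List.foldl_nil]
        split <;> simp
    rw [pv_max_runs _ hne hnn]
    simp only [List.foldl_cons, List.foldl_nil, max_self] at hfwd ⊢
    rw [hfwd, hbwd]
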